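-- pv_equiv track=rewrite | github.com/jate-koh/cu-cp-assignment | password-sec/rainbow.py | substitute_rec
-- ===== SOURCE A (Python) =====
-- substitutes_table = {
--     'o': ['0'],
--     'l': ['1'],
--     'i': ['1']
-- }
--
-- def substitute_rec(letters, current_combination=""):
--     if len(letters) == 0:
--         return [current_combination]
--
--     current_letter = letters[0]
--     remaining_letters = letters[1:]
--
--     # List to collect all combinations
--     combinations = []
--
--     # Add the original letter without substitution
--     combinations += substitute_rec(remaining_letters, current_combination + current_letter)
--
--     # Add all possible substitutions if any
--     if current_letter.lower() in substitutes_table: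
--         for substitute in substitutes_table[current_letter.lower()]:
--             combinations += substitute_rec(remaining_letters, current_combination + substitute)
--
--     return combinations
-- ===== SOURCE B (Python) =====
-- substitutes_table = {
--     'o': ['0'],
--     'l': ['1'],
--     'i': ['1']
-- }
--
-- def substitute_rec(letters, current_combination=""):
--     # Iterative cartesian-product build: one forward pass, no recursion.
--     results = [current_combination]
--     for ch in letters:
--         options = [ch] + substitutes_table.get(ch.lower(), [])
--         results = [prefix + opt for prefix in results for opt in options]
--     return results
-- ===== Notes on version B (the rewrite author's own statement) =====
-- stated objective: simpler
-- what changed: Replaced the per-character recursion with string accumulation by a single iterative pass that extends a list of prefixes with each character's option list (original char first, then its leet substitutes).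
import Mathlib
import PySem

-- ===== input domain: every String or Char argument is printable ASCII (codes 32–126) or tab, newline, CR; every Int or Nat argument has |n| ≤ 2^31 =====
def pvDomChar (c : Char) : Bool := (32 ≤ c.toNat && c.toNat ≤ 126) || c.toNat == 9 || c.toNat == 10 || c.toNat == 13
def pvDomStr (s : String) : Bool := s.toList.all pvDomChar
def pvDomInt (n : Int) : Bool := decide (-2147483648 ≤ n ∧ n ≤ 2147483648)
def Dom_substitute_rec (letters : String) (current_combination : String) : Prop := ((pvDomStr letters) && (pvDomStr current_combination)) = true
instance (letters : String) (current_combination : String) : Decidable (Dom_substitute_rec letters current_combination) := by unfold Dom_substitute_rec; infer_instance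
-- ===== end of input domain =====

-- B replaces A's per-character recursion with a single iterative cartesian-product pass (objective: simpler).

-- shared module-level constant: substitutes_table lookup (key = one lower-cased character)
def pvTableGet? (k : List Char) : Option (List (List Char)) :=
  if k = ['o'] then some [['0']]
  else if k = ['l'] then some [['1']]
  else if k = ['i'] then some [['1']]
  else none

-- ===== PORT A =====
-- A's recursion, on the List Char side (letters[0]/letters[1:] = head/tail)
def substitute_rec_core : List Char → List Char → List (List Char)
  | [], cur => [cur]
  | c :: rest, cur =>
    let combinations : List (List Char) := []
    let combinations := combinations ++ substitute_rec_core rest (cur ++ [c])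
    match pvTableGet? (PySem.Chars.lower [c]) with
    | some subs => subs.foldl (fun acc s => acc ++ substitute_rec_core rest (cur ++ s)) combinations
    | none => combinations

def substitute_rec (letters : String) (current_combination : String) : List String :=
  (substitute_rec_core letters.toList current_combination.toList).map String.mk

-- ===== PORT B =====
-- Source B's loop: results = [prefix + opt for prefix in results for opt in options]
def substitute_rec_alt_step (results : List (List Char)) (c : Char) : List (List Char) :=
  let options : List (List Char) := [c] :: (pvTableGet? (PySem.Chars.lower [c])).getD []
  results.flatMap (fun pfx => options.map (fun opt => pfx ++ opt))

def substitute_rec_alt (letters : String) (current_combination : String) : List String :=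
  (letters.toList.foldl substitute_rec_alt_step [current_combination.toList]).map String.mk

-- ===== PRECONDITION & SPEC =====
def Spec_substitute_rec (letters : String) (current_combination : String) (out : List String) : Prop := out = substitute_rec_alt letters current_combination
instance (letters : String) (current_combination : String) (out : List String) : Decidable (Spec_substitute_rec letters current_combination out) := by unfold Spec_substitute_rec; infer_instance

-- ===== CLAIM (what is proved, stated in full; the proofs are below) =====
def Claim_equal_substitute_rec : Prop := ∀ (letters : String) (current_combination : String), Dom_substitute_rec letters current_combination → Spec_substitute_rec letters current_combination (substitute_rec letters current_combination)

-- ===== LEMMAS AND PROOFS =====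

-- A's node case is the flatMap of the recursive call over the options list
lemma substitute_rec_core_cons (c : Char) (rest cur : List Char) :
    substitute_rec_core (c :: rest) cur =
      (([c] :: (pvTableGet? (PySem.Chars.lower [c])).getD []).flatMap
        (fun s => substitute_rec_core rest (cur ++ s))) := by
  simp only [substitute_rec_core]
  cases h : pvTableGet? (PySem.Chars.lower [c]) with
  | none => simp
  | some subs =>
      simp only [Option.getD_some, List.flatMap_cons, List.nil_append]
      rw [PySem.List.foldl_append_eq_flatMap]

-- loop invariant for B's fold
lemma foldl_step_eq (L : List Char) : ∀ (results : List (List Char)),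
    L.foldl substitute_rec_alt_step results =
      results.flatMap (fun p => substitute_rec_core L p) := by
  induction L with
  | nil => intro results; simp [substitute_rec_core]
  | cons c rest ih =>
      intro results
      simp only [List.foldl_cons, ih, substitute_rec_alt_step]
      rw [List.flatMap_assoc]
      apply List.flatMap_congr
      intro p _
      rw [substitute_rec_core_cons, List.flatMap_map]

-- ===== VERDICT (by name: the statement is the Claim_ definition above) =====
theorem substitute_rec_spec : Claim_equal_substitute_rec := by
  intro letters cur _
  unfold Spec_substitute_rec substitute_rec substitute_rec_alt
  rw [foldl_step_eq]
  simp
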